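-- pv_equiv track=rewrite | github.com/Nuthouse01/PMX-VMD-Scripting-Tools | python/_local_translation_dicts.py | piecewise_translate
-- ===== SOURCE A (Python) =====
-- def piecewise_translate(in_list, in_dict):
-- 	"""
-- 	apply piecewise translation to inputs when given a mapping dict.
-- 	mapping dict should usually be the comprehensive 'words dict' or some results found from Google Translate.
-- 	for each position in the string(ordered), check each map entry(ordered).
-- 	returns what it produces, even if not a complete translation.
-- 	outer layers must check if the translation is complete before using it.
-- 	"""
-- 	input_is_str = isinstance(in_list, str)
-- 	if input_is_str: in_list = [in_list]  # force it to be a list anyway so I don't have to change my structure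
-- 	outlist = []  # list to build & return
--
-- 	dictitems = list(in_dict.items())
--
-- 	for out in in_list:
-- 		if (not out) or out.isspace():  # support bad/missing data
-- 			outlist.append("JP_NULL")
-- 			continue
-- 		# goal: substrings that match keys of "words_dict" get replaced
-- 		# no JOINCHAR between replacement and english text
--
-- 		# NEW ARCHITECTURE: starting from each char, try to match against the contents of the dict. longest items are first!
-- 		i = 0
-- 		while i < len(out):  # starting from each char of the string,
-- 			found_match = False
-- 			for (key, val) in dictitems:  # try to find anything in the dict to match against,
-- 				if out.startswith(key, i):  # and if something is found starting from 'i',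
-- 					found_match = True
-- 					# i am going to replace it key->val, but first maybe insert space before or after or both.
-- 					# note: letter/number are the ONLY things that use joinchar. all punctuation and all JP stuff do not use joinchar.
-- 					# if 'begin-1' is a valid index and the char at that index is letter/number, then PREPEND a space
-- 					before_space = " " if i != 0 and out[i-1].isalnum() else ""
-- 					# if "begin+len(key)" is a valid index and the char at that index is letter/number, then APPEND a space
-- 					after_space = " " if i+len(key) < len(out) and out[i+len(key)].isalnum() else ""
-- 					# now JOINCHAR is added, so now i substitute it
-- 					out = out[0:i] + before_space + val + after_space + out[i+len(key):]
-- 					# i don't need to examine or try to replace on any of these chars, so skip ahead a bit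
-- 					i += len(val) + int(bool(before_space)) + int(bool(after_space))
-- 					# nothing else will match here, since I just replaced the thing, so break out of iterating on dict keys
-- 					break
-- 			if found_match is False:
-- 				i += 1
-- 		# # goal: substrings that match keys of "words_dict" get replaced
-- 		# # no JOINCHAR between replacement and english text
-- 		# for (key, val) in in_dict.items():
-- 		# 	begin = 0
-- 		# 	# while-loop is here to apply all instances of this translation. keep replacing until no longer found.
-- 		# 	while begin != -1:
-- 		# 		begin = out.find(key)
-- 		# 		if begin != -1:  # if it finds a match,
-- 		# 			# i am going to replace it key->val, but first maybe insert space before or after or both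
-- 		# 			# note: letter/number are the ONLY things that use joinchar. all punctuation and all JP stuff do not use joinchar.
-- 		# 			# if 'begin-1' is a valid index and the char at that index is letter/number, then PREPEND a space
-- 		# 			before_space = " " if begin != 0 and out[begin-1].isalnum() else ""
-- 		# 			# if "begin+len(key)" is a valid index and the char at that index is letter/number, then APPEND a space
-- 		# 			after_space = " " if begin+len(key) < len(out) and out[begin+len(key)].isalnum() else ""
-- 		# 			# now JOINCHAR is added, so now i substitute
-- 		# 			out[begin:begin+len(key)] = before_space + val + after_space
-- 		# once all uses of all keys have been replaced, then append the result
-- 		outlist.append(out)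
--
-- 	if input_is_str:	return outlist[0]	# if original input was a single string, then de-listify
-- 	else:				return outlist		# otherwise return as a list
-- ===== SOURCE B (Python) =====
-- def _translate_one(s, items):
-- 	# empty/whitespace-only input data is a placeholder
-- 	if (not s) or s.isspace():
-- 		return "JP_NULL"
-- 	pieces = []   # output fragments, joined once at the end (no quadratic string surgery)
-- 	last = ""     # the last character emitted so far, "" if nothing emitted yet
-- 	rest = s      # the unprocessed suffix of the original string
-- 	while rest:
-- 		for key, val in items:
-- 			if rest.startswith(key):
-- 				before_space = " " if last and last.isalnum() else ""
-- 				tail = rest[len(key):]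
-- 				after_space = " " if tail and tail[0].isalnum() else ""
-- 				piece = before_space + val + after_space
-- 				pieces.append(piece)
-- 				if piece:
-- 					last = piece[-1]
-- 				rest = tail
-- 				break
-- 		else:
-- 			pieces.append(rest[0])
-- 			last = rest[0]
-- 			rest = rest[1:]
-- 	return "".join(pieces)
--
--
-- def piecewise_translate(in_list, in_dict):
-- 	"""Same translation as A, but each string is consumed left-to-right into a
-- 	fragment list joined once at the end, instead of repeatedly splicing the string."""
-- 	input_is_str = isinstance(in_list, str)
-- 	items = list(in_dict.items())
-- 	if input_is_str:
-- 		return _translate_one(in_list, items)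
-- 	return [_translate_one(s, items) for s in in_list]
-- ===== Notes on version B (the rewrite author's own statement) =====
-- stated objective: faster
-- what changed: B consumes each string left-to-right once, emitting output fragments (plus a tracked last-emitted char) that are joined once at the end, instead of A's repeated in-place splicing of the whole string and index arithmetic over the modified string.
import Mathlib
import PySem

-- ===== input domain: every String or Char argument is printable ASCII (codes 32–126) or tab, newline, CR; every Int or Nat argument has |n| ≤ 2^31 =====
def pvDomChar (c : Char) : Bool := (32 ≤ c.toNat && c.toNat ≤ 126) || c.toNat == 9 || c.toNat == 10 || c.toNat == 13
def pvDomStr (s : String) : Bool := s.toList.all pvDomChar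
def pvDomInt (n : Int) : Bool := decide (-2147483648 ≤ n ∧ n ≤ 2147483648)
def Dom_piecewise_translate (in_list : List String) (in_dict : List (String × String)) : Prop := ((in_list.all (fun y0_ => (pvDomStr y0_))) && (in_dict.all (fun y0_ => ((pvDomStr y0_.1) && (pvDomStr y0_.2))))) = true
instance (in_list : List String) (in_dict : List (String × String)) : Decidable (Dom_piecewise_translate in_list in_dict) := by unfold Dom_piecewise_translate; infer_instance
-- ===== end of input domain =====

-- B replaces A's repeated in-place string splicing by a single left-to-right pass that emits
-- output fragments joined once at the end; same return value for every input.


-- ===== PORT A =====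
-- A's inner `for (key, val) in dictitems: if out.startswith(key, i): … break` = first matching item
def pvFindA (items : List (List Char × List Char)) (out : List Char) (i : Nat) :
    Option (List Char × List Char) :=
  items.find? (fun kv => PySem.Chars.startswith (out.drop i) kv.1)

-- A's `while i < len(out)` loop: `out` is re-spliced in place and `i` skips past the insertion.
-- fuel is a totality guard only: |out| - i shrinks every iteration when no key is empty.
def pvLoopA (items : List (List Char × List Char)) : Nat → List Char → Nat → List Char
  | 0, out, _ => out
  | fuel + 1, out, i =>
    if i < out.length then
      match pvFindA items out i with
      | some (key, val) =>
          let before_space := if i ≠ 0 ∧ PySem.Chars.isalnum (out.getD (i - 1) ' ') then [' '] else []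
          let after_space := if i + key.length < out.length ∧
              PySem.Chars.isalnum (out.getD (i + key.length) ' ') then [' '] else []
          pvLoopA items fuel
            (out.take i ++ before_space ++ val ++ after_space ++ out.drop (i + key.length))
            (i + val.length + before_space.length + after_space.length)
      | none => pvLoopA items fuel out (i + 1)
    else out

def piecewise_translate (in_list : List String) (in_dict : List (String × String)) : List String :=
  let dictitems := (PySem.Dict.ofList in_dict).items.map (fun kv => (kv.1.toList, kv.2.toList))
  in_list.foldl
    (fun outlist out =>
      if out = "" ∨ PySem.Str.strIsspace out then outlist ++ ["JP_NULL"]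
      else outlist ++ [String.ofList (pvLoopA dictitems out.toList.length out.toList 0)])
    []

-- ===== PORT B =====
-- Source B's `while rest:` loop over the unprocessed suffix, accumulating output fragments `pieces`
-- and the last emitted character `last`; fuel is a totality guard (|rest| shrinks when no key is empty).
def pvLoopB (items : List (List Char × List Char)) :
    Nat → List (List Char) → List Char → List Char → List (List Char)
  | 0, pieces, _, rest => pieces ++ [rest]
  | fuel + 1, pieces, last, rest =>
    match rest with
    | [] => pieces
    | c :: rtail =>
      match items.find? (fun kv => PySem.Chars.startswith (c :: rtail) kv.1) with
      | some (key, val) =>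
          let before_space := if last ≠ [] ∧ PySem.Chars.strIsalnum last then [' '] else []
          let tail := (c :: rtail).drop key.length
          let after_space := if tail ≠ [] ∧ PySem.Chars.isalnum (tail.headD ' ') then [' '] else []
          let piece := before_space ++ val ++ after_space
          pvLoopB items fuel (pieces ++ [piece])
            (if piece = [] then last else piece.drop (piece.length - 1)) tail
      | none => pvLoopB items fuel (pieces ++ [[c]]) [c] rtail

def pvTranslateOne (items : List (List Char × List Char)) (s : String) : String :=
  if s = "" ∨ PySem.Str.strIsspace s then "JP_NULL"
  else String.ofList (PySem.Chars.join [] (pvLoopB items s.toList.length [] [] s.toList))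

def piecewise_translate_alt (in_list : List String) (in_dict : List (String × String)) : List String :=
  let items := (PySem.Dict.ofList in_dict).items.map (fun kv => (kv.1.toList, kv.2.toList))
  in_list.map (pvTranslateOne items)

-- ===== PRECONDITION & SPEC =====
def Spec_piecewise_translate (in_list : List String) (in_dict : List (String × String)) (out : List String) : Prop := out = piecewise_translate_alt in_list in_dict
instance (in_list : List String) (in_dict : List (String × String)) (out : List String) : Decidable (Spec_piecewise_translate in_list in_dict out) := by unfold Spec_piecewise_translate; infer_instance

-- ===== CLAIM (what is proved, stated in full; the proofs are below) =====
def Claim_equal_piecewise_translate : Prop := ∀ (in_list : List String) (in_dict : List (String × String)), Dom_piecewise_translate in_list in_dict → Spec_piecewise_translate in_list in_dict (piecewise_translate in_list in_dict)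

-- ===== LEMMAS AND PROOFS =====

-- joining fragments with the empty separator is flattening
theorem pv_join_nil (ps : List (List Char)) : PySem.Chars.join [] ps = ps.flatten := by
  simp [PySem.Chars.join, List.intercalate]
  induction ps with
  | nil => simp
  | cons p ps ih => cases ps <;> simp_all [List.intersperse]

theorem pv_strIsalnum_singleton (c : Char) :
    PySem.Chars.strIsalnum [c] = PySem.Chars.isalnum c := by
  simp [PySem.Chars.strIsalnum]

-- indexing just before position |e| in e ++ rest reads the last char of e
theorem pv_getD_last (e rest : List Char) (d : Char) (h : e ≠ []) :
    (e ++ rest).getD (e.length - 1) d = e.getLast h := by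
  have hlt : e.length - 1 < e.length := by
    cases e with | nil => exact absurd rfl h | cons a t => simp
  rw [List.getD_eq_getElem?_getD, List.getElem?_append_left hlt,
    List.getLast_eq_getElem]
  simp [List.getElem?_eq_getElem hlt]

-- dropping all but the last char of e ++ p, p nonempty, only reads p
theorem pv_drop_last_append (e p : List Char) (hp : p ≠ []) :
    (e ++ p).drop ((e ++ p).length - 1) = p.drop (p.length - 1) := by
  have h1 : 0 < p.length := List.length_pos_iff.mpr hp
  rw [List.drop_append, List.drop_eq_nil_of_le (by rw [List.length_append]; omega),
    show (e ++ p).length - 1 - e.length = p.length - 1 by rw [List.length_append]; omega]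
  simp

-- the state correspondence: A's (out, i) with out = pieces.flatten ++ rest, i = |pieces.flatten|
-- matches B's (pieces, last, rest), with `last` holding the final char of the emitted prefix.
theorem pv_loop_eq (items : List (List Char × List Char)) :
    ∀ (fuel : Nat) (e : List Char) (pieces : List (List Char)) (last rest : List Char),
      pieces.flatten = e → last = e.drop (e.length - 1) →
      pvLoopA items fuel (e ++ rest) e.length
        = (pvLoopB items fuel pieces last rest).flatten := by
  intro fuel
  induction fuel with
  | zero =>
    intro e pieces last rest he _
    simp [pvLoopA, pvLoopB, he]
  | succ fuel ih =>
    intro e pieces last rest he hlast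
    match rest with
    | [] => simp [pvLoopA, pvLoopB, he]
    | c :: rtail =>
      have hguard : e.length < (e ++ c :: rtail).length := by simp
      have hdrop : (e ++ c :: rtail).drop e.length = c :: rtail := List.drop_left
      rw [pvLoopA, if_pos hguard]
      show (match pvFindA items (e ++ c :: rtail) e.length with
        | some (key, val) => _ | none => _) = _
      rw [show pvFindA items (e ++ c :: rtail) e.length
            = items.find? (fun kv => PySem.Chars.startswith (c :: rtail) kv.1) by
          simp [pvFindA, hdrop]]
      rw [pvLoopB]
      cases hf : items.find? (fun kv => PySem.Chars.startswith (c :: rtail) kv.1) with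
      | none =>
        simp only []
        have h3 : (pieces ++ [[c]]).flatten = e ++ [c] := by simp [he]
        have hl2 : ([c] : List Char) = (e ++ [c]).drop ((e ++ [c]).length - 1) := by
          rw [show (e ++ [c]).length - 1 = e.length by simp, List.drop_left]
        have := ih (e ++ [c]) (pieces ++ [[c]]) [c] rtail h3 hl2
        simpa using this
      | some kv =>
        obtain ⟨key, val⟩ := kv
        have hpre : key <+: (c :: rtail) := by
          have := List.find?_some hf
          exact (PySem.Chars.startswith_iff _ _).mp (by simpa using this)
        obtain ⟨tl, htl⟩ := hpre
        simp only []
        -- the two before_space conditions agree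
        have hbs : (if e.length ≠ 0 ∧ PySem.Chars.isalnum ((e ++ c :: rtail).getD (e.length - 1) ' ')
              then ([' '] : List Char) else [])
            = (if last ≠ [] ∧ PySem.Chars.strIsalnum last then [' '] else []) := by
          rcases eq_or_ne e [] with hE | hne
          · have hl0 : last = [] := by rw [hlast, hE]; simp
            simp [hE, hl0]
          · have hlast' : last = [e.getLast hne] := by
              rw [hlast, List.drop_length_sub_one hne]
            have hlen : e.length ≠ 0 := by
              intro h0; exact hne (List.eq_nil_of_length_eq_zero h0)
            rw [pv_getD_last e (c :: rtail) ' ' hne, hlast']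
            simp [pv_strIsalnum_singleton, hlen]
        -- tails agree
        have htail : (c :: rtail).drop key.length = tl := by
          rw [← htl, List.drop_left]
        have hlen2 : (e ++ c :: rtail).length = e.length + key.length + tl.length := by
          rw [← htl]; simp; omega
        -- the two after_space conditions agree
        have has : (if e.length + key.length < (e ++ c :: rtail).length ∧
              PySem.Chars.isalnum ((e ++ c :: rtail).getD (e.length + key.length) ' ')
              then ([' '] : List Char) else [])
            = (if (c :: rtail).drop key.length ≠ [] ∧
                PySem.Chars.isalnum (((c :: rtail).drop key.length).headD ' ') then [' '] else []) := by
          rw [htail]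
          cases hT : tl with
          | nil =>
            have hnlt : ¬ e.length + key.length < (e ++ c :: rtail).length := by
              rw [hlen2, hT]; simp
            rw [if_neg (by rintro ⟨h1, _⟩; exact hnlt h1),
              if_neg (by rintro ⟨h1, _⟩; exact h1 rfl)]
          | cons b bt =>
            have hlt : e.length + key.length < (e ++ c :: rtail).length := by
              rw [hlen2, hT]; simp
            have hget : (e ++ c :: rtail).getD (e.length + key.length) ' ' = b := by
              rw [← htl, hT, List.getD_eq_getElem?_getD, ← List.append_assoc,
                show e.length + key.length = (e ++ key).length by simp,
                List.getElem?_append_right (le_refl _)]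
              simp
            have hle : key.length ≤ rtail.length := by
              have := congrArg List.length htl
              simp [hT] at this
              omega
            rw [hget]
            simp [hle]
        rw [hbs, has, htail]
        set bs := (if last ≠ [] ∧ PySem.Chars.strIsalnum last then ([' '] : List Char) else []) with hbsd
        set asp := (if tl ≠ [] ∧ PySem.Chars.isalnum (tl.headD ' ') then ([' '] : List Char) else []) with haspd
        set piece := bs ++ val ++ asp with hpiece
        -- A's spliced string and advanced index are B's new flatten state
        have hXe : (pieces ++ [piece]).flatten = e ++ piece := by simp [he]
        have hout : (e ++ c :: rtail).take e.length ++ bs ++ val ++ asp ++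
              (e ++ c :: rtail).drop (e.length + key.length)
            = (pieces ++ [piece]).flatten ++ tl := by
          rw [List.take_left, ← htl, ← List.append_assoc,
            show e.length + key.length = (e ++ key).length by simp,
            List.drop_left, hXe, hpiece]
          simp
        have hidx : e.length + val.length + bs.length + asp.length
            = (pieces ++ [piece]).flatten.length := by
          rw [hXe, hpiece]; simp; omega
        rw [hout, hidx]
        refine ih ((pieces ++ [piece]).flatten) (pieces ++ [piece])
          (if piece = [] then last else piece.drop (piece.length - 1)) tl rfl ?_
        rw [hXe]
        by_cases hp : piece = []
        · rw [if_pos hp, hp]; simpa using hlast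
        · rw [if_neg hp]
          exact (pv_drop_last_append e piece hp).symm

-- per-string agreement
theorem pv_one_eq (items : List (List Char × List Char)) (s : String) :
    (if s = "" ∨ PySem.Str.strIsspace s then "JP_NULL"
      else String.ofList (pvLoopA items s.toList.length s.toList 0))
    = pvTranslateOne items s := by
  unfold pvTranslateOne
  by_cases h : s = "" ∨ PySem.Str.strIsspace s = true
  · simp only [if_pos h]
  · simp only [if_neg h]
    rw [pv_join_nil]
    exact congrArg String.ofList (pv_loop_eq items s.toList.length [] [] [] s.toList rfl rfl)

-- A's foldl-with-append outer loop is B's map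
theorem pv_fold_eq (items : List (List Char × List Char)) (l : List String) :
    ∀ (acc : List String),
      l.foldl (fun outlist out =>
        if out = "" ∨ PySem.Str.strIsspace out then outlist ++ ["JP_NULL"]
        else outlist ++ [String.ofList (pvLoopA items out.toList.length out.toList 0)]) acc
      = acc ++ l.map (pvTranslateOne items) := by
  induction l with
  | nil => intro acc; simp
  | cons s t iht =>
    intro acc
    simp only [List.foldl_cons, List.map_cons]
    rw [← pv_one_eq items s]
    by_cases h : s = "" ∨ PySem.Str.strIsspace s = true
    · rw [if_pos h, if_pos h, iht]; simp
    · rw [if_neg h, if_neg h, iht]; simp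

-- ===== VERDICT (by name: the statement is the Claim_ definition above) =====
theorem piecewise_translate_spec : Claim_equal_piecewise_translate := by
  intro in_list in_dict _
  unfold Spec_piecewise_translate piecewise_translate piecewise_translate_alt
  simpa using pv_fold_eq
    ((PySem.Dict.ofList in_dict).items.map (fun kv => (kv.1.toList, kv.2.toList))) in_list []
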